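-- pv_equiv track=rewrite | github.com/skipperglume/spanet4top | utils/produceHDF5.py | getPairWiseDicts
-- ===== SOURCE A (Python) =====
-- def getPairWiseDicts(costMatrix : dict) -> list:
--     '''
--     Create dictionaries to store the parton-jet and jet-parton pairs
--     '''
--     partonToJets = {}
--     jetToPartons = {}
--     for partonLabel in costMatrix:
--         for jetLabel in costMatrix[partonLabel]:
--             if partonLabel not in partonToJets:
--                 partonToJets[partonLabel] = [jetLabel]
--             else:
--                 partonToJets[partonLabel].append(jetLabel)
--             if jetLabel not in jetToPartons:
--                 jetToPartons[jetLabel] = [partonLabel]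
--             else:
--                 jetToPartons[jetLabel].append(partonLabel)
--     return (partonToJets, jetToPartons)
-- ===== SOURCE B (Python) =====
-- def getPairWiseDicts(costMatrix : dict) -> list:
--     '''
--     Create dictionaries to store the parton-jet and jet-parton pairs
--     '''
--     # flatten to an explicit (parton, jet) pair list, then group each direction
--     # with one generic group-by-key: keys in first-appearance order, and for each
--     # key a filter scan of the pair list collecting its values.
--     pairs = [(p, j) for p in costMatrix for j in costMatrix[p]]
--
--     def group(prs):
--         keys = dict.fromkeys(k for k, _ in prs)
--         return {k: [v for q, v in prs if q == k] for k in keys}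
--
--     return (group(pairs), group([(j, p) for (p, j) in pairs]))
-- ===== Notes on version B (the rewrite author's own statement) =====
-- stated objective: alternative
-- what changed: A's interleaved nested loop growing both dicts entry by entry is replaced by flattening to an explicit (parton, jet) pair list and applying one generic group-by-key twice (to the pairs and to the swapped pairs): first-appearance key order via dict.fromkeys, then a per-key filter scan collecting values.
import Mathlib
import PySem

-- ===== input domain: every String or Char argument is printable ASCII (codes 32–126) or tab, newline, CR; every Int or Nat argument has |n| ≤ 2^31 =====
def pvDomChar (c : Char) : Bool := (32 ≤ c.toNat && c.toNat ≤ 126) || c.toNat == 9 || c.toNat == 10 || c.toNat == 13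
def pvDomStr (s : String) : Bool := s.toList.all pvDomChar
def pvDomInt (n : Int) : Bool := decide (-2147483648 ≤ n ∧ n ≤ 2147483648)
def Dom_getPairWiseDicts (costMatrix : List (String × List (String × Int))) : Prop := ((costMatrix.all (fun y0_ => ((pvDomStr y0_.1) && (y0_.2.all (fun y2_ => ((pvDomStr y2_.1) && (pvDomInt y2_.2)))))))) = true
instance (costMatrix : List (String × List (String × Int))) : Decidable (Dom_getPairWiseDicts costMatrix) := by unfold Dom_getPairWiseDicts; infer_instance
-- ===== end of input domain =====

-- B replaces A's interleaved nested loop (growing both dicts entry by entry) by flattening to an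
-- explicit (parton, jet) pair list and applying one generic group-by-key twice; alternative decomposition.

-- ===== PORT A =====
-- A iterates the partons and, per parton, the keys of its inner jet dict, growing BOTH result
-- dicts entry by entry ("not in" test, then create-[x] or append).
def getPairWiseDicts (costMatrix : List (String × List (String × Int))) :
    (List (String × List String)) × (List (String × List String)) :=
  let st := costMatrix.foldl
    (fun st pr =>
      (pr.2.map (·.1)).foldl
        (fun st j =>
          ((if !(st.1.contains pr.1) then st.1.insert pr.1 [j]
            else st.1.insert pr.1 (st.1.getD pr.1 [] ++ [j])),
           (if !(st.2.contains j) then st.2.insert j [pr.1]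
            else st.2.insert j (st.2.getD j [] ++ [pr.1]))))
        st)
    ((PySem.Dict.empty, PySem.Dict.empty) :
      PySem.Dict String (List String) × PySem.Dict String (List String))
  (st.1.items, st.2.items)

-- ===== PORT B =====
-- Source B's generic 'group': keys = dict.fromkeys(firsts) (= PySem.List.dedup, first occurrences in
-- order), then for each key the comprehension [v for q, v in prs if q == k] (a filter scan).
def pvGroup (prs : List (String × String)) : List (String × List String) :=
  (PySem.List.dedup (prs.map (·.1))).map
    (fun k => (k, (prs.filter (fun q => q.1 == k)).map (·.2)))

def getPairWiseDicts_alt (costMatrix : List (String × List (String × Int))) :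
    (List (String × List String)) × (List (String × List String)) :=
  let pairs : List (String × String) :=
    costMatrix.flatMap (fun pr => (pr.2.map (·.1)).map (fun j => (pr.1, j)))
  (pvGroup pairs, pvGroup (pairs.map (fun x => (x.2, x.1))))

-- ===== PRECONDITION & SPEC =====
def Spec_getPairWiseDicts (costMatrix : List (String × List (String × Int))) (out : (List (String × List String)) × (List (String × List String))) : Prop := out = getPairWiseDicts_alt costMatrix
instance (costMatrix : List (String × List (String × Int))) (out : (List (String × List String)) × (List (String × List String))) : Decidable (Spec_getPairWiseDicts costMatrix out) := by unfold Spec_getPairWiseDicts; infer_instance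

-- ===== CLAIM =====
def Claim_equal_getPairWiseDicts : Prop := ∀ (costMatrix : List (String × List (String × Int))), Dom_getPairWiseDicts costMatrix → Spec_getPairWiseDicts costMatrix (getPairWiseDicts costMatrix)

-- ===== LEMMAS AND PROOFS =====

-- the (parton, jet) pairs in A's visit order (= B's flattened pair list)
def pvPairs (cm : List (String × List (String × Int))) : List (String × String) :=
  cm.flatMap (fun pr => (pr.2.map (·.1)).map (fun j => (pr.1, j)))

-- A's per-pair dict update is exactly modify k [] (· ++ [v])
theorem pv_step_eq_modify (d : PySem.Dict String (List String)) (k v : String) :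
    (if !(d.contains k) then d.insert k [v] else d.insert k (d.getD k [] ++ [v]))
      = d.modify k [] (· ++ [v]) := by
  show _ = d.insert k (d.getD k [] ++ [v])
  cases h : d.contains k with
  | false => rw [PySem.Dict.getD_of_not_contains d [] h]; simp
  | true => simp

theorem pv_inner (p : String) (l : List String)
    (st : PySem.Dict String (List String) × PySem.Dict String (List String)) :
    l.foldl
      (fun st j =>
        ((if !(st.1.contains p) then st.1.insert p [j]
          else st.1.insert p (st.1.getD p [] ++ [j])),
         (if !(st.2.contains j) then st.2.insert j [p]
          else st.2.insert j (st.2.getD j [] ++ [p])))) st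
    = (l.map (fun j => (p, j))).foldl
        (fun st x => (st.1.modify x.1 [] (fun l => l ++ [x.2]),
                      st.2.modify x.2 [] (fun l => l ++ [x.1]))) st := by
  induction l generalizing st with
  | nil => rfl
  | cons j l ih =>
    simp only [List.foldl_cons, List.map_cons]
    rw [ih]
    congr 1
    simp only [pv_step_eq_modify]

theorem pv_A_fold (cm : List (String × List (String × Int)))
    (st : PySem.Dict String (List String) × PySem.Dict String (List String)) :
    cm.foldl
      (fun st pr =>
        (pr.2.map (·.1)).foldl
          (fun st j =>
            ((if !(st.1.contains pr.1) then st.1.insert pr.1 [j]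
              else st.1.insert pr.1 (st.1.getD pr.1 [] ++ [j])),
             (if !(st.2.contains j) then st.2.insert j [pr.1]
              else st.2.insert j (st.2.getD j [] ++ [pr.1]))))
          st) st
    = (pvPairs cm).foldl
        (fun st x => (st.1.modify x.1 [] (fun l => l ++ [x.2]),
                      st.2.modify x.2 [] (fun l => l ++ [x.1]))) st := by
  induction cm generalizing st with
  | nil => rfl
  | cons pr cm ih =>
    have hP : pvPairs (pr :: cm) = ((pr.2.map (·.1)).map (fun j => (pr.1, j))) ++ pvPairs cm := by
      simp [pvPairs]
    rw [List.foldl_cons, hP, List.foldl_append, ih, pv_inner]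

-- A's result, as the two independent grouping folds over the pair list
theorem pv_A_eq (cm : List (String × List (String × Int))) :
    getPairWiseDicts cm =
      (((pvPairs cm).foldl (fun d x => d.modify x.1 [] (fun l => l ++ [x.2])) PySem.Dict.empty).items,
       (((pvPairs cm).map (fun x => (x.2, x.1))).foldl (fun d x => d.modify x.1 [] (fun l => l ++ [x.2])) PySem.Dict.empty).items) := by
  unfold getPairWiseDicts
  rw [pv_A_fold]
  have h := PySem.List.foldl_prod_mk
    (fun (d : PySem.Dict String (List String)) (x : String × String) => d.modify x.1 [] (fun l => l ++ [x.2]))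
    (fun (d : PySem.Dict String (List String)) (x : String × String) => d.modify x.2 [] (fun l => l ++ [x.1]))
    (pvPairs cm) PySem.Dict.empty PySem.Dict.empty
  rw [h]
  conv_rhs => rw [List.foldl_map]

-- the items of the grouping fold are exactly B's group-by-key output
theorem pv_fold_items (L : List (String × String)) :
    (L.foldl (fun d x => d.modify x.1 [] (fun l => l ++ [x.2])) PySem.Dict.empty).items
      = pvGroup L := by
  have hk : (L.foldl (fun d x => d.modify x.1 [] (fun l => l ++ [x.2])) (PySem.Dict.empty : PySem.Dict String (List String))).keys
      = PySem.List.dedup (L.map (·.1)) := by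
    rw [PySem.Dict.keys_foldl_modify_key L Prod.fst [] (fun _ x => fun l => l ++ [x.2])]
    rw [PySem.Dict.keys_empty, PySem.List.dedup_eq_ofList]
    exact PySem.Set.update_nil_left _
  have hnd : (L.foldl (fun d x => d.modify x.1 [] (fun l => l ++ [x.2])) (PySem.Dict.empty : PySem.Dict String (List String))).keys.Nodup :=
    PySem.Dict.nodup_keys_foldl_modify_key L Prod.fst [] (fun _ x => fun l => l ++ [x.2]) _ PySem.Dict.nodup_keys_empty
  rw [PySem.Dict.items_eq_map_keys _ hnd [], hk]
  apply List.map_congr_left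
  intro k _
  rw [PySem.Dict.getD_foldl_modify_append]
  simp

-- ===== VERDICT =====
theorem getPairWiseDicts_spec : Claim_equal_getPairWiseDicts := by
  intro cm _
  unfold Spec_getPairWiseDicts
  rw [pv_A_eq, pv_fold_items, pv_fold_items]
  rfl
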